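-- pv_equiv track=rewrite | github.com/Mingoomato/Orchestrate-the-TEAM | memory_layer.py | format_recent_sessions
-- ===== SOURCE A (Python) =====
-- def format_recent_sessions(sessions: list[dict], max_chars: int = 1200) -> str:
--     """Format recent session summaries for council context injection."""
--     if not sessions:
--         return ""
--     lines = ["## Past Council Sessions\n"]
--     total = 0
--     for s in sessions:
--         date    = s.get("date") or s.get("created_at", "")[:10]
--         agenda  = (s.get("agenda") or "")[:200]
--         verdict = s.get("risk_verdict") or ""
--         snippet = f"**[{date}]** Agenda: {agenda}" + (f" | Risk verdict: {verdict}" if verdict else "")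
--         total += len(snippet)
--         if total > max_chars:
--             break
--         lines.append(snippet)
--         lines.append("")
--     return "\n".join(lines)
-- ===== SOURCE B (Python) =====
-- from itertools import accumulate, takewhile
--
--
-- def _snippet(s: dict) -> str:
--     date = s.get("date") or s.get("created_at", "")[:10]
--     agenda = (s.get("agenda") or "")[:200]
--     verdict = s.get("risk_verdict") or ""
--     return f"**[{date}]** Agenda: {agenda}" + (f" | Risk verdict: {verdict}" if verdict else "")
--
--
-- def format_recent_sessions(sessions: list[dict], max_chars: int = 1200) -> str:
--     if not sessions:
--         return ""
--     snippets = [_snippet(s) for s in sessions]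
--     keep = len(list(takewhile(lambda t: t <= max_chars,
--                               accumulate(len(x) for x in snippets))))
--     body = [part for snip in snippets[:keep] for part in (snip, "")]
--     return "\n".join(["## Past Council Sessions\n"] + body)
-- ===== Notes on version B (the rewrite author's own statement) =====
-- stated objective: alternative
-- what changed: A's single for-loop with a running total and break is replaced by a pipeline: build all snippets with a comprehension, count the kept prefix via itertools.accumulate+takewhile over snippet lengths, then slice and join.
import Mathlib
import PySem

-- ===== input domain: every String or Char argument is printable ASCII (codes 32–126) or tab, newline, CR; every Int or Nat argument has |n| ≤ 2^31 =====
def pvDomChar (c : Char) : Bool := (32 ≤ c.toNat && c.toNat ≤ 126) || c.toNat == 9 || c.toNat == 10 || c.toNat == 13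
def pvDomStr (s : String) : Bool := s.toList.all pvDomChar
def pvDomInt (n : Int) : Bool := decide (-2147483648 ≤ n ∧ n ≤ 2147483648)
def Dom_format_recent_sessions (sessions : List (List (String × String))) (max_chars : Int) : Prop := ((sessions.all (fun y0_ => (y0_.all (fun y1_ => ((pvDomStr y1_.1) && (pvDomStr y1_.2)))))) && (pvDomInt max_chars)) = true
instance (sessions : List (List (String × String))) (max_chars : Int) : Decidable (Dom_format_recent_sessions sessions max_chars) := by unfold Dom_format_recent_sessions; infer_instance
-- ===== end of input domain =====

-- B re-decomposes A's single accumulate-and-break loop into map / prefix-sums-takewhile / slice / join; same values, alternative structure.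

-- shared helper: dict.get (first match on the association list)
def pvDictGet (s : List (String × String)) (k : String) : Option String :=
  (s.find? (fun p => p.1 == k)).map (·.2)

-- shared helper: the per-session snippet both Pythons build with identical code
-- (date via `get("date") or get("created_at","")[:10]`, 200-char agenda, optional verdict clause); exact on char lists
def pvSnippet (s : List (String × String)) : List Char :=
  let dateRaw := ((pvDictGet s "date").getD "").toList
  let date := if dateRaw ≠ [] then dateRaw else (((pvDictGet s "created_at").getD "").toList).take 10
  let agenda := (((pvDictGet s "agenda").getD "").toList).take 200
  let verdict := ((pvDictGet s "risk_verdict").getD "").toList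
  "**[".toList ++ date ++ "]** Agenda: ".toList ++ agenda ++
    (if verdict ≠ [] then " | Risk verdict: ".toList ++ verdict else [])

-- ===== PORT A =====
-- A's for-loop with `total` accumulator and `break`, appending snippet and "" per kept session
def pvLoopA (max_chars : Int) : List (List (String × String)) → Int → List (List Char)
  | [], _ => []
  | s :: rest, total =>
    let snippet := pvSnippet s
    let total' := total + (snippet.length : Int)
    if total' > max_chars then []
    else snippet :: [] :: pvLoopA max_chars rest total'

def format_recent_sessions (sessions : List (List (String × String))) (max_chars : Int) : String :=
  if sessions = [] then ""
  else String.mk (PySem.Chars.join ['\n'] ("## Past Council Sessions\n".toList :: pvLoopA max_chars sessions 0))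

-- ===== PORT B =====
def format_recent_sessions_alt (sessions : List (List (String × String))) (max_chars : Int) : String :=
  if sessions = [] then ""
  else
    let snippets := sessions.map pvSnippet
    let cums := ((snippets.map (fun x => (x.length : Int))).scanl (· + ·) 0).tail
    let keep := (cums.takeWhile (fun t => t ≤ max_chars)).length
    let body := (snippets.take keep).flatMap (fun snip => [snip, []])
    String.mk (PySem.Chars.join ['\n'] ("## Past Council Sessions\n".toList :: body))

-- ===== PRECONDITION & SPEC =====
def Spec_format_recent_sessions (sessions : List (List (String × String))) (max_chars : Int) (out : String) : Prop := out = format_recent_sessions_alt sessions max_chars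
instance (sessions : List (List (String × String))) (max_chars : Int) (out : String) : Decidable (Spec_format_recent_sessions sessions max_chars out) := by unfold Spec_format_recent_sessions; infer_instance

-- ===== CLAIM (what is proved, stated in full; the proofs are below) =====
def Claim_equal_format_recent_sessions : Prop := ∀ (sessions : List (List (String × String))) (max_chars : Int), Dom_format_recent_sessions sessions max_chars → Spec_format_recent_sessions sessions max_chars (format_recent_sessions sessions max_chars)

-- ===== LEMMAS AND PROOFS =====

-- A's break-loop equals B's take-by-prefix-sums, for any starting total
theorem pvLoopA_eq (max_chars : Int) (ss : List (List (String × String))) (total : Int) :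
    pvLoopA max_chars ss total =
      ((ss.map pvSnippet).take
        (((((ss.map pvSnippet).map (fun x => (x.length : Int))).scanl (· + ·) total).tail.takeWhile
            (fun t => t ≤ max_chars)).length)).flatMap (fun snip => [snip, []]) := by
  induction ss generalizing total with
  | nil => simp [pvLoopA]
  | cons s rest ih =>
    have hsc : ∀ (c : Int) (ls : List Int),
        List.scanl (· + ·) c ls = c :: (List.scanl (· + ·) c ls).tail := by
      intro c ls; cases ls <;> simp
    simp only [pvLoopA, List.map_cons, List.map_map, List.scanl_cons, List.tail_cons]
    rw [hsc (total + ((pvSnippet s).length : Int))]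
    simp only [List.takeWhile_cons]
    by_cases h : total + ((pvSnippet s).length : Int) ≤ max_chars
    · have hgt : ¬ total + ((pvSnippet s).length : Int) > max_chars := by omega
      simp only [if_neg hgt, decide_eq_true h, List.length_cons, List.take_succ_cons,
        List.flatMap_cons]
      rw [ih (total + ((pvSnippet s).length : Int))]
      simp [List.map_map]
    · have hgt : total + ((pvSnippet s).length : Int) > max_chars := by omega
      simp [hgt, h]

theorem format_recent_sessions_spec : Claim_equal_format_recent_sessions := by
  intro sessions max_chars _
  unfold Spec_format_recent_sessions format_recent_sessions format_recent_sessions_alt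
  by_cases h : sessions = []
  · simp [h]
  · simp only [if_neg h]
    rw [pvLoopA_eq]
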